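-- pv_equiv track=rewrite | github.com/jay-odedra/InclusiveGenMatcher | CountingDecays/DecayCounterUpdated.py | conjugate
-- ===== SOURCE A (Python) =====
-- def conjugate(keytuple,mapping):
--     def create_zeros_tuple(t):
--         if isinstance(t, tuple):  # Check if it's a tuple
--             return tuple(create_zeros_tuple(sub) for sub in t)  # Recurse for each sub-tuple
--         else:
--             return 0  # Replace non-tuple elements with 0
--
--     zeros_tuple = create_zeros_tuple(keytuple)
--     conjugate_tuple = create_zeros_tuple(keytuple)
--     zeros_tuple = [list(item) for item in zeros_tuple]
--     conjugate_tuple = [list(item) for item in conjugate_tuple]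
--
--
--
--     for i in range(len(keytuple)):
--         for j in range(len(keytuple[i])):
--             zeros_tuple[i][j] = mapping[str(int(keytuple[i][j]))][1]
--     for i in range(len(keytuple)):
--         for j in range(len(keytuple[i])):
--             if zeros_tuple[i][j] == False:
--                 conjugate_tuple[i][j] = int(keytuple[i][j])*-1
--             else:
--                 conjugate_tuple[i][j] = int(keytuple[i][j])
--     conjugate_tuple = tuple(map(tuple, conjugate_tuple))
--     return conjugate_tuple
-- ===== SOURCE B (Python) =====
-- def _conj_elem(x, mapping):
--     v = int(x)
--     return v * -1 if mapping[str(v)][1] == False else v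
--
--
-- def conjugate(keytuple, mapping):
--     return tuple(tuple(_conj_elem(x, mapping) for x in row) for row in keytuple)
-- ===== Notes on version B (the rewrite author's own statement) =====
-- stated objective: simpler
-- what changed: Replaces the recursive zero-scaffold builder and the two separate index-based passes (fill a flags table, then rewrite it) with a single direct comprehension that conjugates each element as it is visited; no intermediate tables, no index arithmetic.
import Mathlib
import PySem

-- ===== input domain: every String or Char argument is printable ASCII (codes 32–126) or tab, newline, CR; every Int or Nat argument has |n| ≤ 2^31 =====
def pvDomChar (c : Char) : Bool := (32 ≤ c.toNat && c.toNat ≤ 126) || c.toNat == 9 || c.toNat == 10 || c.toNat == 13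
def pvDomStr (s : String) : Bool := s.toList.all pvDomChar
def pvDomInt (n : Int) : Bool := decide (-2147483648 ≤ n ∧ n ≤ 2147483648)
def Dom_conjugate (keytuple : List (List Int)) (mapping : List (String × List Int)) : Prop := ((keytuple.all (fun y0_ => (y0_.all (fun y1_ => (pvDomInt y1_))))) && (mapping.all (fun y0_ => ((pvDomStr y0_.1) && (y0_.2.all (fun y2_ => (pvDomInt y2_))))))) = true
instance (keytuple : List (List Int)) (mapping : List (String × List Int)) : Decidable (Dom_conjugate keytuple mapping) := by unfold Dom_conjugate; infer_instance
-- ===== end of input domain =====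

-- B replaces A's recursive zero-scaffold and two index-based fill passes by one direct
-- per-element comprehension (objective: simpler).

-- mapping[str(v)] (dict lookup; Pre_ guarantees the key is present and the value long enough)
def pvLookup (mapping : List (String × List Int)) (k : String) : List Int :=
  (PySem.Dict.get? (PySem.Dict.ofList mapping) k).getD []

-- ===== PORT A =====
-- create_zeros_tuple: on a tuple of tuples of ints this is two levels of recursion
def createZeros (t : List (List Int)) : List (List Int) :=
  t.map (fun sub => sub.map (fun _ => (0 : Int)))

def conjugate (keytuple : List (List Int)) (mapping : List (String × List Int)) : List (List Int) :=
  let zeros0 := createZeros keytuple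
  let conj0 := createZeros keytuple
  -- first pass: zeros_tuple[i][j] = mapping[str(int(keytuple[i][j]))][1]
  let zeros :=
    (PySem.List.pyRange 0 (keytuple.length : Int) 1).foldl (fun z i =>
      (PySem.List.pyRange 0 ((PySem.List.pyGetD keytuple i []).length : Int) 1).foldl (fun z j =>
        PySem.List.pySetD z i
          (PySem.List.pySetD (PySem.List.pyGetD z i []) j
            (PySem.List.pyGetD
              (pvLookup mapping
                (PySem.Int.toStr (PySem.List.pyGetD (PySem.List.pyGetD keytuple i []) j 0)))
              1 0))) z) zeros0
  -- second pass: conjugate_tuple[i][j] = ±int(keytuple[i][j]) depending on zeros[i][j] == False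
  let conj :=
    (PySem.List.pyRange 0 (keytuple.length : Int) 1).foldl (fun c i =>
      (PySem.List.pyRange 0 ((PySem.List.pyGetD keytuple i []).length : Int) 1).foldl (fun c j =>
        PySem.List.pySetD c i
          (PySem.List.pySetD (PySem.List.pyGetD c i []) j
            (if PySem.List.pyGetD (PySem.List.pyGetD zeros i []) j 0 == 0 then
               PySem.List.pyGetD (PySem.List.pyGetD keytuple i []) j 0 * -1
             else
               PySem.List.pyGetD (PySem.List.pyGetD keytuple i []) j 0))) c) conj0
  conj

-- ===== PORT B =====
def conjElem (mapping : List (String × List Int)) (x : Int) : Int :=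
  let v := x
  if PySem.List.pyGetD (pvLookup mapping (PySem.Int.toStr v)) 1 0 == 0 then v * -1 else v

def conjugate_alt (keytuple : List (List Int)) (mapping : List (String × List Int)) : List (List Int) :=
  keytuple.map (fun row => row.map (conjElem mapping))

-- ===== PRECONDITION & SPEC =====
-- Pre_ excludes exactly the inputs where Python A raises: a key str(v) missing from
-- mapping (KeyError) or mapped to a list with fewer than two entries (IndexError).
def Pre_conjugate (keytuple : List (List Int)) (mapping : List (String × List Int)) : Prop :=
  ∀ row ∈ keytuple, ∀ v ∈ row, 2 ≤ (pvLookup mapping (PySem.Int.toStr v)).length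
instance (keytuple : List (List Int)) (mapping : List (String × List Int)) : Decidable (Pre_conjugate keytuple mapping) := by unfold Pre_conjugate; infer_instance

def pvWitness_conjugate : List (List Int) × (List (String × List Int)) :=
  ([[1, -2], [3]], [("1", [11, 0]), ("-2", [22, 1]), ("3", [33, 5])])

def Spec_conjugate (keytuple : List (List Int)) (mapping : List (String × List Int)) (out : List (List Int)) : Prop := out = conjugate_alt keytuple mapping
instance (keytuple : List (List Int)) (mapping : List (String × List Int)) (out : List (List Int)) : Decidable (Spec_conjugate keytuple mapping out) := by unfold Spec_conjugate; infer_instance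

-- ===== CLAIM (what is proved, stated in full; the proofs are below) =====
def Claim_equal_conjugate : Prop := ∀ (keytuple : List (List Int)) (mapping : List (String × List Int)), Dom_conjugate keytuple mapping → Pre_conjugate keytuple mapping → Spec_conjugate keytuple mapping (conjugate keytuple mapping)

-- ===== LEMMAS AND PROOFS =====

lemma foldl_pySetD_local {α : Type} (i : Int) (hi0 : 0 ≤ i) (d : α)
    (step : α → Int → α) :
    ∀ (L : List Int) (z : List α), i.toNat < z.length →
      L.foldl (fun z j => PySem.List.pySetD z i (step (PySem.List.pyGetD z i d) j)) z
        = PySem.List.pySetD z i (L.foldl step (PySem.List.pyGetD z i d)) := by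
  intro L
  induction L with
  | nil =>
    intro z hz
    simp [PySem.List.pySetD_of_nonneg _ _ hi0, PySem.List.pyGetD_of_nonneg _ _ hi0,
      List.getD_eq_getElem?_getD, List.getElem?_eq_getElem hz]
  | cons j L ih =>
    intro z hz
    simp only [List.foldl_cons]
    rw [ih _ (by simp [PySem.List.length_pySetD, hz])]
    rw [PySem.List.pySetD_of_nonneg _ _ hi0, PySem.List.pySetD_of_nonneg _ _ hi0,
        PySem.List.pySetD_of_nonneg _ _ hi0, List.set_set]
    congr 2
    rw [PySem.List.pyGetD_of_nonneg _ _ hi0, List.getD_eq_getElem?_getD,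
        List.getElem?_set_self (by exact hz), PySem.List.pyGetD_of_nonneg _ _ hi0]
    simp

-- 'for k in range(n): xs[k] = g(k)' rewrites the first n entries of xs
lemma foldl_pySetD_range {α : Type} (g : Int → α) :
    ∀ (n : ℕ) (z : List α), n ≤ z.length →
      (PySem.List.pyRange 0 (n : Int) 1).foldl (fun z k => PySem.List.pySetD z k (g k)) z
        = (PySem.List.pyRange 0 (n : Int) 1).map g ++ z.drop n := by
  intro n
  induction n with
  | zero => intro z hz; simp [PySem.List.pyRange_one_eq_nil]
  | succ n ih =>
    intro z hz
    have h1 : ((n : Int) + 1) = ((n + 1 : ℕ) : Int) := by push_cast; ring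
    rw [← h1, PySem.List.pyRange_one_succ_right (by positivity), List.foldl_append, List.map_append]
    rw [ih z (by omega)]
    have hlen : ((PySem.List.pyRange 0 (n : Int) 1).map g).length = n := by
      simp [PySem.List.length_pyRange_one]
    simp only [List.foldl_cons, List.foldl_nil, List.map_cons, List.map_nil]
    rw [PySem.List.pySetD_of_nonneg _ _ (by positivity)]
    rw [show ((n:Int)).toNat = n by omega]
    rw [List.drop_eq_getElem_cons (by omega : n < z.length)]
    rw [show ((List.map g (PySem.List.pyRange 0 (n:Int) 1) ++ z[n] :: List.drop (n + 1) z).set n (g n)) = List.map g (PySem.List.pyRange 0 (n:Int) 1) ++ (z[n] :: List.drop (n + 1) z).set (n - n) (g n) from by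
      rw [List.set_append]; simp [hlen]]
    simp only [Nat.sub_self, List.set_cons_zero, List.append_assoc, List.cons_append, List.nil_append]

-- a row-local loop body applied along range(n) rewrites each of the first n rows in place
lemma foldl_rows {α : Type} (d : α) (F : List α → Int → List α) (h : Int → α → α)
    (hF : ∀ (z : List α) (i : Int), 0 ≤ i → i.toNat < z.length →
        F z i = PySem.List.pySetD z i (h i (PySem.List.pyGetD z i d))) :
    ∀ (n : ℕ) (z : List α), n ≤ z.length →
      (PySem.List.pyRange 0 (n : Int) 1).foldl F z
        = (PySem.List.pyRange 0 (n : Int) 1).map (fun i => h i (PySem.List.pyGetD z i d)) ++ z.drop n := by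
  intro n
  induction n with
  | zero => intro z hz; simp [PySem.List.pyRange_one_eq_nil]
  | succ n ih =>
    intro z hz
    have h1 : ((n : Int) + 1) = ((n + 1 : ℕ) : Int) := by push_cast; ring
    rw [← h1, PySem.List.pyRange_one_succ_right (by positivity), List.foldl_append, List.map_append]
    rw [ih z (by omega)]
    have hlen : ((PySem.List.pyRange 0 (n : Int) 1).map (fun i => h i (PySem.List.pyGetD z i d))).length = n := by
      simp [PySem.List.length_pyRange_one]
    set A := (PySem.List.pyRange 0 (n : Int) 1).map (fun i => h i (PySem.List.pyGetD z i d)) with hA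
    simp only [List.foldl_cons, List.foldl_nil, List.map_cons, List.map_nil]
    have hlen2 : (A ++ z.drop n).length = z.length := by
      simp [hlen]; omega
    rw [hF _ _ (by positivity) (by rw [hlen2]; omega)]
    have hget : PySem.List.pyGetD (A ++ z.drop n) (n : Int) d = PySem.List.pyGetD z (n : Int) d := by
      rw [PySem.List.pyGetD_of_nonneg _ _ (by positivity), PySem.List.pyGetD_of_nonneg _ _ (by positivity)]
      rw [show ((n:Int)).toNat = n by omega]
      rw [List.getD_eq_getElem?_getD, List.getD_eq_getElem?_getD]
      rw [List.getElem?_append_right (by omega), hlen, Nat.sub_self]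
      rw [List.getElem?_drop, Nat.add_zero]
    rw [hget]
    rw [PySem.List.pySetD_of_nonneg _ _ (by positivity), show ((n:Int)).toNat = n by omega]
    rw [List.drop_eq_getElem_cons (by omega : n < z.length)]
    rw [show ((A ++ z[n] :: List.drop (n + 1) z).set n (h (n:Int) (PySem.List.pyGetD z (n:Int) d))) = A ++ (z[n] :: List.drop (n + 1) z).set (n - n) (h (n:Int) (PySem.List.pyGetD z (n:Int) d)) from by
      rw [List.set_append]; simp [hlen]]
    simp only [Nat.sub_self, List.set_cons_zero, List.append_assoc, List.cons_append, List.nil_append]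

lemma conjugate_eq_alt (keytuple : List (List Int)) (mapping : List (String × List Int)) :
    conjugate keytuple mapping = conjugate_alt keytuple mapping := by
  simp only [conjugate]
  have hz0len : (createZeros keytuple).length = keytuple.length := by simp [createZeros]
  have hrow0 : ∀ i : Int, PySem.List.pyGetD (createZeros keytuple) i []
      = (PySem.List.pyGetD keytuple i []).map (fun _ => (0:Int)) := by
    intro i
    have := PySem.List.pyGetD_map (fun sub => sub.map (fun _ => (0:Int))) keytuple i []
    simpa [createZeros] using this
  -- the first loop, as a table of flags
  set gZ : Int → Int → Int := fun i j =>
    PySem.List.pyGetD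
      (pvLookup mapping
        (PySem.Int.toStr (PySem.List.pyGetD (PySem.List.pyGetD keytuple i []) j 0))) 1 0 with hgZ
  have hzeros :
      (PySem.List.pyRange 0 (keytuple.length : Int) 1).foldl (fun z i =>
        (PySem.List.pyRange 0 ((PySem.List.pyGetD keytuple i []).length : Int) 1).foldl (fun z j =>
          PySem.List.pySetD z i
            (PySem.List.pySetD (PySem.List.pyGetD z i []) j (gZ i j))) z) (createZeros keytuple)
      = (PySem.List.pyRange 0 (keytuple.length : Int) 1).map
          (fun i => (PySem.List.pyRange 0 ((PySem.List.pyGetD keytuple i []).length : Int) 1).map (gZ i)) := by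
    rw [foldl_rows ([] : List Int) _
      (fun i r => (PySem.List.pyRange 0 ((PySem.List.pyGetD keytuple i []).length : Int) 1).foldl
        (fun r j => PySem.List.pySetD r j (gZ i j)) r)
      (by
        intro z i hi0 hilen
        exact foldl_pySetD_local i hi0 [] (fun r j => PySem.List.pySetD r j (gZ i j)) _ z hilen)
      keytuple.length _ (le_of_eq hz0len.symm)]
    rw [List.drop_eq_nil_of_le (le_of_eq hz0len), List.append_nil]
    apply List.map_congr_left
    intro i hi
    have hi' := (PySem.List.mem_pyRange_one).1 hi
    rw [foldl_pySetD_range (gZ i) _ _ (by rw [hrow0 i]; simp)]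
    rw [hrow0 i]
    simp
  rw [hzeros]
  set Z := (PySem.List.pyRange 0 (keytuple.length : Int) 1).map
      (fun i => (PySem.List.pyRange 0 ((PySem.List.pyGetD keytuple i []).length : Int) 1).map (gZ i)) with hZ
  set gC : Int → Int → Int := fun i j =>
    if PySem.List.pyGetD (PySem.List.pyGetD Z i []) j 0 == 0 then
      PySem.List.pyGetD (PySem.List.pyGetD keytuple i []) j 0 * -1
    else
      PySem.List.pyGetD (PySem.List.pyGetD keytuple i []) j 0 with hgC
  have hconj :
      (PySem.List.pyRange 0 (keytuple.length : Int) 1).foldl (fun c i =>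
        (PySem.List.pyRange 0 ((PySem.List.pyGetD keytuple i []).length : Int) 1).foldl (fun c j =>
          PySem.List.pySetD c i
            (PySem.List.pySetD (PySem.List.pyGetD c i []) j (gC i j))) c) (createZeros keytuple)
      = (PySem.List.pyRange 0 (keytuple.length : Int) 1).map
          (fun i => (PySem.List.pyRange 0 ((PySem.List.pyGetD keytuple i []).length : Int) 1).map (gC i)) := by
    rw [foldl_rows ([] : List Int) _
      (fun i r => (PySem.List.pyRange 0 ((PySem.List.pyGetD keytuple i []).length : Int) 1).foldl
        (fun r j => PySem.List.pySetD r j (gC i j)) r)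
      (by
        intro z i hi0 hilen
        exact foldl_pySetD_local i hi0 [] (fun r j => PySem.List.pySetD r j (gC i j)) _ z hilen)
      keytuple.length _ (le_of_eq hz0len.symm)]
    rw [List.drop_eq_nil_of_le (le_of_eq hz0len), List.append_nil]
    apply List.map_congr_left
    intro i hi
    rw [foldl_pySetD_range (gC i) _ _ (by rw [hrow0 i]; simp)]
    rw [hrow0 i]
    simp
  rw [hconj]
  -- the filled table IS B's per-element map
  have hfinal : ∀ i : Int, 0 ≤ i → i < (keytuple.length : Int) →
      (PySem.List.pyRange 0 ((PySem.List.pyGetD keytuple i []).length : Int) 1).map (gC i)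
        = (PySem.List.pyGetD keytuple i []).map (conjElem mapping) := by
    intro i hi0 hiN
    have hrowmap := PySem.List.map_pyGetD_pyRange_zero (PySem.List.pyGetD keytuple i []) (0 : Int)
    conv_rhs => rw [← hrowmap]
    rw [List.map_map]
    apply List.map_congr_left
    intro j hj
    have hj' := (PySem.List.mem_pyRange_one).1 hj
    have hZi : PySem.List.pyGetD Z i []
        = (PySem.List.pyRange 0 ((PySem.List.pyGetD keytuple i []).length : Int) 1).map (gZ i) := by
      rw [hZ]
      exact PySem.List.pyGetD_map_pyRange_of_nonneg _ _ _ _ hi0 hiN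
    have hZij : PySem.List.pyGetD (PySem.List.pyGetD Z i []) j 0 = gZ i j := by
      rw [hZi]
      exact PySem.List.pyGetD_map_pyRange_of_nonneg _ _ _ _ hj'.1 (by
        simpa [PySem.List.len] using hj'.2)
    simp only [hgC, hZij, Function.comp, conjElem, hgZ]
  -- outer: map over range(len) of rows IS the row list itself
  rw [List.map_congr_left (fun i hi => hfinal i ((PySem.List.mem_pyRange_one).1 hi).1
      ((PySem.List.mem_pyRange_one).1 hi).2)]
  have hktmap := PySem.List.map_pyGetD_pyRange_zero keytuple ([] : List Int)
  conv_rhs => rw [conjugate_alt, ← hktmap]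
  rw [List.map_map]
  rfl

-- ===== VERDICT (by name: the statement is the Claim_ definition above) =====
theorem conjugate_spec : Claim_equal_conjugate := by
  intro keytuple mapping _ _
  unfold Spec_conjugate
  exact conjugate_eq_alt keytuple mapping
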